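-- pv_equiv track=rewrite | github.com/mzk-cyber/ai-pt-edu-mvp | backend/app/simulator.py | map_user_test_inputs_to_ids
-- ===== SOURCE A (Python) =====
-- from typing import Any, Iterable
--
-- def normalize_free_text(s: str) -> str:
--     return "".join(ch.lower() for ch in s.strip())
--
-- def map_user_test_inputs_to_ids(user_inputs: Iterable[str], synonym_to_id: dict[str, str]) -> tuple[list[str], list[str]]:
--     mapped: list[str] = []
--     unknown: list[str] = []
--     for raw in user_inputs:
--         k = normalize_free_text(raw)
--         test_id = synonym_to_id.get(k)
--         if test_id is None:
--             unknown.append(raw)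
--             continue
--         if test_id not in mapped:
--             mapped.append(test_id)
--     return mapped, unknown
-- ===== SOURCE B (Python) =====
-- def normalize_free_text(s: str) -> str:
--     return "".join(ch.lower() for ch in s.strip())
--
-- def map_user_test_inputs_to_ids(user_inputs, synonym_to_id):
--     pairs = [(raw, synonym_to_id.get(normalize_free_text(raw))) for raw in list(user_inputs)]
--     unknown = [raw for raw, tid in pairs if tid is None]
--     ids = [tid for _, tid in pairs if tid is not None]
--     return list(dict.fromkeys(ids)), unknown
-- ===== Notes on version B (the rewrite author's own statement) =====
-- stated objective: simpler
-- what changed: B splits A's single stateful loop (inline 'not in mapped' dedup) into a mapping comprehension building (raw, lookup) pairs, two selections for mapped ids and unknowns, and a separate dict.fromkeys dedup phase.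
import Mathlib
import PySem

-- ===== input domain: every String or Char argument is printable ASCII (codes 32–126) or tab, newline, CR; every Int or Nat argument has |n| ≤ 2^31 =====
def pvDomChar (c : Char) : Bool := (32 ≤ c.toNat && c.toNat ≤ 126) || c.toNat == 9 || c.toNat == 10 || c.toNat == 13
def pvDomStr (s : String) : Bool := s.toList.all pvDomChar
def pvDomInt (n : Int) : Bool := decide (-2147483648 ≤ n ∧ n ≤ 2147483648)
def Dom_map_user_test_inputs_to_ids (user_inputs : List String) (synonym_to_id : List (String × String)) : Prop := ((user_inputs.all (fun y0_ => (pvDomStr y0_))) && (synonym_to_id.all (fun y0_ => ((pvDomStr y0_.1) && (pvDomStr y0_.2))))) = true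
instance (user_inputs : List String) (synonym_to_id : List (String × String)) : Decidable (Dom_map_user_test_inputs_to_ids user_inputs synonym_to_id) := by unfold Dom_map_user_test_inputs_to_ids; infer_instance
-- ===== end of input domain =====

-- B separates mapping from deduplication: one comprehension pass building (id, unknown)
-- lists, then dict.fromkeys for the ordered dedup — objective: a simpler two-phase decomposition.

-- ===== PORT A =====
-- normalize_free_text: strip, then lower each char (exact on the ASCII domain)
def pvNorm (s : String) : String := PySem.Str.lower (PySem.Str.strip s)

-- dict.get on the association list (first match, per the type convention)
def pvLookup (d : List (String × String)) (k : String) : Option String :=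
  (d.find? (fun p => p.1 == k)).map (fun p => p.2)

def map_user_test_inputs_to_ids (user_inputs : List String) (synonym_to_id : List (String × String)) : List String × List String :=
  user_inputs.foldl (fun (acc : List String × List String) raw =>
    match pvLookup synonym_to_id (pvNorm raw) with
    | none => (acc.1, acc.2 ++ [raw])
    | some tid => (if acc.1.contains tid then acc.1 else acc.1 ++ [tid], acc.2))
    ([], [])

-- ===== PORT B =====
def map_user_test_inputs_to_ids_alt (user_inputs : List String) (synonym_to_id : List (String × String)) : List String × List String :=
  let pairs := user_inputs.map (fun raw => (raw, pvLookup synonym_to_id (pvNorm raw)))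
  let unknown := (pairs.filter (fun p => p.2.isNone)).map (fun p => p.1)
  let ids := pairs.filterMap (fun p => p.2)
  (PySem.List.dedup ids, unknown)

-- ===== PRECONDITION & SPEC =====
def Spec_map_user_test_inputs_to_ids (user_inputs : List String) (synonym_to_id : List (String × String)) (out : List String × List String) : Prop := out = map_user_test_inputs_to_ids_alt user_inputs synonym_to_id
instance (user_inputs : List String) (synonym_to_id : List (String × String)) (out : List String × List String) : Decidable (Spec_map_user_test_inputs_to_ids user_inputs synonym_to_id out) := by unfold Spec_map_user_test_inputs_to_ids; infer_instance

-- ===== CLAIM (what is proved, stated in full; the proofs are below) =====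
def Claim_equal_map_user_test_inputs_to_ids : Prop := ∀ (user_inputs : List String) (synonym_to_id : List (String × String)), Dom_map_user_test_inputs_to_ids user_inputs synonym_to_id → Spec_map_user_test_inputs_to_ids user_inputs synonym_to_id (map_user_test_inputs_to_ids user_inputs synonym_to_id)

-- ===== LEMMAS AND PROOFS =====

-- A's loop, starting from an arbitrary accumulator, equals B's three phases
-- applied on top of that accumulator.
theorem pv_loop_eq (syn : List (String × String)) :
    ∀ (ui : List String) (acc : List String × List String),
      ui.foldl (fun (acc : List String × List String) raw =>
        match pvLookup syn (pvNorm raw) with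
        | none => (acc.1, acc.2 ++ [raw])
        | some tid => (if acc.1.contains tid then acc.1 else acc.1 ++ [tid], acc.2)) acc
      = (PySem.Set.update acc.1
            ((ui.map (fun raw => (raw, pvLookup syn (pvNorm raw)))).filterMap (fun p => p.2)),
         acc.2 ++ (((ui.map (fun raw => (raw, pvLookup syn (pvNorm raw)))).filter
            (fun p => p.2.isNone)).map (fun p => p.1))) := by
  intro ui
  induction ui with
  | nil => intro acc; simp [PySem.Set.update]
  | cons raw rest ih =>
    intro acc
    simp only [List.foldl_cons, List.map_cons]
    cases h : pvLookup syn (pvNorm raw) with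
    | none =>
      simp only [ih]
      simp [List.append_assoc]
    | some tid =>
      simp only [ih]
      simp [PySem.Set.update, PySem.Set.add]

-- ===== VERDICT (by name: the statement is the Claim_ definition above) =====
theorem map_user_test_inputs_to_ids_spec : Claim_equal_map_user_test_inputs_to_ids := by
  intro ui syn _
  unfold Spec_map_user_test_inputs_to_ids map_user_test_inputs_to_ids map_user_test_inputs_to_ids_alt
  rw [pv_loop_eq]
  simp [PySem.Set.update, PySem.List.dedup_eq_ofList, PySem.Set.ofList_eq_foldl]
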